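-- pv_equiv track=rewrite | github.com/fractal-analytics-platform/fractal-server | tests/v2/fractal_tasks_mock/src/fractal_tasks_mock/utils.py | _extract_common_root
-- ===== SOURCE A (Python) =====
-- def _extract_common_root(zarr_urls: list[str]) -> dict[str, str]:
--     shared_plates = []
--     shared_root_dirs = []
--     for zarr_url in zarr_urls:
--         tmp = zarr_url.split(".zarr/")[0]
--         shared_root_dirs.append("/".join(tmp.split("/")[:-1]))
--         shared_plates.append(tmp.split("/")[-1] + ".zarr")
--
--     if len(set(shared_plates)) > 1 or len(set(shared_root_dirs)) > 1:
--         raise ValueError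
--     shared_plate = list(shared_plates)[0]
--     shared_root_dir = list(shared_root_dirs)[0]
--
--     return dict(shared_root_dir=shared_root_dir, shared_plate=shared_plate)
-- ===== SOURCE B (Python) =====
-- def _extract_common_root(zarr_urls: list[str]) -> dict[str, str]:
--     def parse(url):
--         tmp = url.split(".zarr/")[0]
--         parts = tmp.split("/")
--         return "/".join(parts[:-1]), parts[-1] + ".zarr"
--
--     ref_root, ref_plate = parse(zarr_urls[0])
--     for url in zarr_urls[1:]:
--         if parse(url) != (ref_root, ref_plate):
--             raise ValueError
--     return dict(shared_root_dir=ref_root, shared_plate=ref_plate)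
-- ===== Notes on version B (the rewrite author's own statement) =====
-- stated objective: simpler
-- what changed: Instead of accumulating two parallel lists over all URLs and then counting distinct values with sets, B parses the first URL as a reference and validates each remaining URL against it with an early exit, returning the reference pair.
import Mathlib
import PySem

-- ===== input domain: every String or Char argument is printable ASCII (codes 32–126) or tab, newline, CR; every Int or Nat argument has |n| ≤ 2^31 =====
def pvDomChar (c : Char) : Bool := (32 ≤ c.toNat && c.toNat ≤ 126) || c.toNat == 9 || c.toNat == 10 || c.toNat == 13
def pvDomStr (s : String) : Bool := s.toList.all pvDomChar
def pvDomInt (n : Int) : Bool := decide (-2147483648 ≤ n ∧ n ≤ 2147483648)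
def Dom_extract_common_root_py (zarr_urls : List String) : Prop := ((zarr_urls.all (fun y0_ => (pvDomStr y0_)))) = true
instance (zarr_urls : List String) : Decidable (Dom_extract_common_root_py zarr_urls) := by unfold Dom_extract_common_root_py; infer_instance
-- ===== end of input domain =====

-- B validates each URL against the first one with an early exit instead of accumulating
-- two lists and counting distinct values via sets; same results, different decomposition.

-- ===== PORT A =====
-- A: accumulate root-dir and plate lists over all URLs, then check the sets have ≤ 1 element.
def extract_common_root_py (zarr_urls : List String) : List (String × String) :=
  let acc := zarr_urls.foldl
    (fun (acc : List String × List String) zarr_url =>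
      let tmp := ((PySem.Str.split? zarr_url ".zarr/").getD []).headD ""
      (acc.1 ++ [PySem.Str.join "/" ((PySem.Str.split? tmp "/").getD []).dropLast],
       acc.2 ++ [((PySem.Str.split? tmp "/").getD []).getLastD "" ++ ".zarr"]))
    ([], [])
  let shared_root_dirs := acc.1
  let shared_plates := acc.2
  if 1 < PySem.Set.len (PySem.Set.ofList shared_plates) ∨
     1 < PySem.Set.len (PySem.Set.ofList shared_root_dirs) then
    []  -- Python: raise ValueError
  else
    match PySem.List.pyGet? shared_plates 0, PySem.List.pyGet? shared_root_dirs 0 with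
    | some shared_plate, some shared_root_dir =>
        [("shared_root_dir", shared_root_dir), ("shared_plate", shared_plate)]
    | _, _ => []  -- Python: IndexError on empty input

-- ===== PORT B =====
-- B's helper parse(url) -> (root_dir, plate)
def pvParse_alt (url : String) : String × String :=
  let tmp := ((PySem.Str.split? url ".zarr/").getD []).headD ""
  let parts := (PySem.Str.split? tmp "/").getD []
  (PySem.Str.join "/" parts.dropLast, parts.getLastD "" ++ ".zarr")

def extract_common_root_py_alt (zarr_urls : List String) : List (String × String) :=
  match zarr_urls with
  | [] => []  -- Python: IndexError on zarr_urls[0]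
  | u :: rest =>
    let ref := pvParse_alt u
    if rest.all (fun url => pvParse_alt url == ref) then
      [("shared_root_dir", ref.1), ("shared_plate", ref.2)]
    else []  -- Python: raise ValueError

-- ===== PRECONDITION & SPEC =====
-- Pre_'s own copy of the per-URL parse (may not reach the ports).
def pvParsePre (url : String) : String × String :=
  let tmp := ((PySem.Str.split? url ".zarr/").getD []).headD ""
  let parts := (PySem.Str.split? tmp "/").getD []
  (PySem.Str.join "/" parts.dropLast, parts.getLastD "")

-- Pre_ excludes exactly the inputs where A raises: the empty list (IndexError) and
-- lists whose URLs do not all share the same root dir and plate (ValueError).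
def Pre_extract_common_root_py (zarr_urls : List String) : Prop :=
  zarr_urls ≠ [] ∧ ∀ v ∈ zarr_urls, pvParsePre v = pvParsePre (zarr_urls.headD "")
instance (zarr_urls : List String) : Decidable (Pre_extract_common_root_py zarr_urls) := by
  unfold Pre_extract_common_root_py; infer_instance

def pvWitness_extract_common_root_py : List String :=
  ["a.zarr/0"]

def Spec_extract_common_root_py (zarr_urls : List String) (out : List (String × String)) : Prop := out = extract_common_root_py_alt zarr_urls
instance (zarr_urls : List String) (out : List (String × String)) : Decidable (Spec_extract_common_root_py zarr_urls out) := by unfold Spec_extract_common_root_py; infer_instance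

-- ===== CLAIM (what is proved, stated in full; the proofs are below) =====
def Claim_equal_extract_common_root_py : Prop := ∀ (zarr_urls : List String), Dom_extract_common_root_py zarr_urls → Pre_extract_common_root_py zarr_urls → Spec_extract_common_root_py zarr_urls (extract_common_root_py zarr_urls)

-- ===== LEMMAS AND PROOFS =====

-- B's parse agrees with Pre_'s parse (the plate just gains the ".zarr" suffix).
theorem pvParse_alt_eq (url : String) :
    pvParse_alt url = ((pvParsePre url).1, (pvParsePre url).2 ++ ".zarr") := rfl

-- A's accumulation loop builds exactly the two per-URL maps.
theorem foldA_eq (l : List String) (r p : List String) :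
    l.foldl
      (fun (acc : List String × List String) zarr_url =>
        let tmp := ((PySem.Str.split? zarr_url ".zarr/").getD []).headD ""
        (acc.1 ++ [PySem.Str.join "/" ((PySem.Str.split? tmp "/").getD []).dropLast],
         acc.2 ++ [((PySem.Str.split? tmp "/").getD []).getLastD "" ++ ".zarr"]))
      (r, p)
    = (r ++ l.map (fun v => (pvParsePre v).1),
       p ++ l.map (fun v => (pvParsePre v).2 ++ ".zarr")) := by
  induction l generalizing r p with
  | nil => simp
  | cons x xs ih =>
    simp only [List.foldl_cons, List.map_cons]
    rw [ih]
    simp [pvParsePre]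

-- A Nodup list all of whose elements are equal has length ≤ 1.
theorem length_le_one_of_const {α : Type} (l : List α) (a : α)
    (hnd : l.Nodup) (h : ∀ x ∈ l, x = a) : l.length ≤ 1 := by
  match l with
  | [] => simp
  | [x] => simp
  | x :: y :: t =>
    exfalso
    have hx : x = a := h x (by simp)
    have hy : y = a := h y (by simp)
    have := (List.nodup_cons.mp hnd).1
    simp [hx, hy] at this

theorem set_len_le_one {α : Type} [BEq α] [LawfulBEq α] (l : List α) (a : α)
    (h : ∀ x ∈ l, x = a) : ¬ (1 < PySem.Set.len (PySem.Set.ofList l)) := by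
  have hone : ((PySem.Set.ofList l : List α)).length ≤ 1 :=
    length_le_one_of_const _ a (PySem.Set.nodup_ofList l)
      (fun x hx => h x ((PySem.Set.mem_ofList l x).mp hx))
  simp only [PySem.Set.len]
  omega

-- ===== VERDICT (by name: the statement is the Claim_ definition above) =====
theorem extract_common_root_py_spec : Claim_equal_extract_common_root_py := by
  intro zarr_urls _ hpre
  obtain ⟨hne, hall⟩ := hpre
  match zarr_urls with
  | [] => exact absurd rfl hne
  | u :: rest =>
    unfold Spec_extract_common_root_py extract_common_root_py extract_common_root_py_alt
    simp only [List.headD_cons] at hall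
    have hparse : ∀ v ∈ rest, pvParsePre v = pvParsePre u := fun v hv => hall v (by simp [hv])
    -- B's all-check succeeds
    have hAll : rest.all (fun url => pvParse_alt url == pvParse_alt u) = true := by
      rw [List.all_eq_true]
      intro v hv
      simp [pvParse_alt_eq, hparse v hv]
    rw [foldA_eq]
    simp only [List.nil_append, List.map_cons]
    -- the two set-size tests fail
    have hp : ¬ (1 < PySem.Set.len (PySem.Set.ofList
        (((pvParsePre u).2 ++ ".zarr") :: rest.map (fun v => (pvParsePre v).2 ++ ".zarr")))) := by
      apply set_len_le_one _ ((pvParsePre u).2 ++ ".zarr")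
      intro x hx
      simp only [List.mem_cons, List.mem_map] at hx
      rcases hx with h | ⟨v, hv, rfl⟩
      · exact h
      · rw [hparse v hv]
    have hr : ¬ (1 < PySem.Set.len (PySem.Set.ofList
        ((pvParsePre u).1 :: rest.map (fun v => (pvParsePre v).1)))) := by
      apply set_len_le_one _ (pvParsePre u).1
      intro x hx
      simp only [List.mem_cons, List.mem_map] at hx
      rcases hx with h | ⟨v, hv, rfl⟩
      · exact h
      · rw [hparse v hv]
    rw [if_neg (not_or.mpr ⟨hp, hr⟩), hAll]
    simp [PySem.List.pyGet?, PySem.List.pyIdx?, pvParse_alt_eq]
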